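-- pv_equiv track=rewrite | github.com/NathanJ60/FIX6 | fix6_model.py | _compute_signs
-- ===== SOURCE A (Python) =====
-- GRID = 6
--
-- def effective(value: int, yellow: bool) -> int:
--     """Valeur effective (doublée si case jaune)."""
--     return value * 2 if yellow else value
--
-- def _compute_signs(solution, yellows):
--     """À partir de la solution et des cases jaunes, calcule tous les signes.
--
--     Retourne (h_signs, v_signs, ok) où ok=False si deux cases adjacentes ont
--     la même valeur effective (aucune inégalité stricte possible).
--     """
--     h = [[None] * (GRID - 1) for _ in range(GRID)]
--     v = [[None] * GRID for _ in range(GRID - 1)]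
--     for r in range(GRID):
--         for c in range(GRID - 1):
--             a = effective(solution[r][c], yellows[r][c])
--             b = effective(solution[r][c + 1], yellows[r][c + 1])
--             if a == b:
--                 return None, None, False
--             h[r][c] = '<' if a < b else '>'
--     for r in range(GRID - 1):
--         for c in range(GRID):
--             a = effective(solution[r][c], yellows[r][c])
--             b = effective(solution[r + 1][c], yellows[r + 1][c])
--             if a == b:
--                 return None, None, False
--             # Convention visuelle : 'v' (point en bas) = top > bottom ;
--             # '^' (point en haut) = top < bottom
--             v[r][c] = 'v' if a > b else '^'
--     return h, v, True
-- ===== SOURCE B (Python) =====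
-- GRID = 6
--
-- def _compute_signs(solution, yellows):
--     """Check-then-build: a lazy short-circuit any() over generators of all
--     adjacent effective-value pairs decides ok up front; only then are the sign
--     grids rendered declaratively from a precomputed effective grid with
--     zip-against-shift comprehensions (no early return inside a fill loop)."""
--     def eff(r, c):
--         v = solution[r][c]
--         return v * 2 if yellows[r][c] else v
--
--     hscan = ((eff(r, c), eff(r, c + 1)) for r in range(GRID) for c in range(GRID - 1))
--     vscan = ((eff(r, c), eff(r + 1, c)) for r in range(GRID - 1) for c in range(GRID))
--     if any(a == b for a, b in hscan) or any(a == b for a, b in vscan):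
--         return None, None, False
--     grid = [[eff(r, c) for c in range(GRID)] for r in range(GRID)]
--     h = [['<' if a < b else '>' for a, b in zip(row, row[1:])] for row in grid]
--     v = [['v' if a > b else '^' for a, b in zip(top, bot)] for top, bot in zip(grid, grid[1:])]
--     return h, v, True
-- ===== Notes on version B (the rewrite author's own statement) =====
-- stated objective: alternative
-- what changed: B is check-then-build: instead of A's two nested fill loops that interleave comparison, early return and in-place grid assignment, B first decides ok with one short-circuit any() over generators of all adjacent effective-value pairs, and only then renders the sign grids declaratively from a precomputed effective grid using zip-against-shift comprehensions.
import Mathlib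
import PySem

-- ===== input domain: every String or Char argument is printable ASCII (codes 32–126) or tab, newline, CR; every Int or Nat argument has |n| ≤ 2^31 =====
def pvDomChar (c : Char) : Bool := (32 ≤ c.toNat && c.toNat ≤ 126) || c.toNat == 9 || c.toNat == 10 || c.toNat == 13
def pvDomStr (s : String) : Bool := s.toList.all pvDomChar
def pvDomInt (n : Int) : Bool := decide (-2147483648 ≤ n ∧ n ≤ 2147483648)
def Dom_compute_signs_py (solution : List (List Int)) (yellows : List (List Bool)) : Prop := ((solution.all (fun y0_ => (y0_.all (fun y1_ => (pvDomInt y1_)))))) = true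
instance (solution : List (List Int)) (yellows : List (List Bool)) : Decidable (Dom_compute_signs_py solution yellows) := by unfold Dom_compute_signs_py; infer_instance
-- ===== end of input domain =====

set_option maxHeartbeats 1600000

-- B is check-then-build: one short-circuit any() over the adjacent effective-value pairs
-- decides ok up front, and the sign grids are then rendered declaratively from a precomputed
-- effective grid with zip-against-shift comprehensions (objective: alternative).

-- shared cell access: the getD default stands where Python raises IndexError (outside Pre_)
def pvGetI (g : List (List Int)) (r c : Nat) : Int := (g.getD r []).getD c 0
def pvGetB (g : List (List Bool)) (r c : Nat) : Bool := (g.getD r []).getD c false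
-- grid[r][c] = x
def pvSet2 (g : List (List (Option String))) (r c : Nat) (x : Option String) : List (List (Option String)) :=
  g.set r ((g.getD r []).set c x)

-- ===== PORT A =====
def pvEff (value : Int) (yellow : Bool) : Int := if yellow then value * 2 else value

def pvAeff (sol : List (List Int)) (yel : List (List Bool)) (r c : Nat) : Int :=
  pvEff (pvGetI sol r c) (pvGetB yel r c)

def compute_signs_py (solution : List (List Int)) (yellows : List (List Bool)) : Option (List (List (Option String))) × Option (List (List (Option String))) × Bool :=
  let h0 : List (List (Option String)) := List.replicate 6 (List.replicate 5 none)
  let v0 : List (List (Option String)) := List.replicate 5 (List.replicate 6 none)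
  let hRes := (List.range 6).foldl (fun acc r => acc.bind fun h =>
      (List.range 5).foldl (fun acc2 c => acc2.bind fun h =>
        let a := pvAeff solution yellows r c
        let b := pvAeff solution yellows r (c+1)
        if a = b then none
        else some (pvSet2 h r c (some (if a < b then "<" else ">")))) (some h)) (some h0)
  match hRes with
  | none => (none, none, false)
  | some h =>
    let vRes := (List.range 5).foldl (fun acc r => acc.bind fun v =>
        (List.range 6).foldl (fun acc2 c => acc2.bind fun v =>
          let a := pvAeff solution yellows r c
          let b := pvAeff solution yellows (r+1) c
          if a = b then none
          else some (pvSet2 v r c (some (if b < a then "v" else "^")))) (some v)) (some v0)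
    match vRes with
    | none => (none, none, false)
    | some v => (some h, some v, true)

-- ===== PORT B =====
-- eff(r, c): the effective value read directly from the grids
def pvBeff (sol : List (List Int)) (yel : List (List Bool)) (r c : Nat) : Int :=
  let v := (sol.getD r []).getD c 0
  if (yel.getD r []).getD c false then v * 2 else v

def compute_signs_py_alt (solution : List (List Int)) (yellows : List (List Bool)) : Option (List (List (Option String))) × Option (List (List (Option String))) × Bool :=
  -- the two any() scans over the generators of adjacent effective-value pairs, in scan order
  if ((List.range 6).flatMap fun r => (List.range 5).map fun c =>
        (pvBeff solution yellows r c, pvBeff solution yellows r (c+1))).any (fun ab => ab.1 == ab.2) ||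
     ((List.range 5).flatMap fun r => (List.range 6).map fun c =>
        (pvBeff solution yellows r c, pvBeff solution yellows (r+1) c)).any (fun ab => ab.1 == ab.2) then
    (none, none, false)
  else
    -- grid = [[eff(r, c) for c ...] for r ...]; h and v by zipping rows / the grid against their shifts
    (some (((List.range 6).map fun r => (List.range 6).map fun c => pvBeff solution yellows r c).map fun row =>
        (row.zip (PySem.List.slice row (some 1) none)).map fun ab =>
          some (if ab.1 < ab.2 then "<" else ">")),
     some ((((List.range 6).map fun r => (List.range 6).map fun c => pvBeff solution yellows r c).zip
            (PySem.List.slice ((List.range 6).map fun r => (List.range 6).map fun c => pvBeff solution yellows r c) (some 1) none)).map fun p =>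
        (p.1.zip p.2).map fun ab => some (if ab.2 < ab.1 then "v" else "^")),
     true)

-- ===== PRECONDITION & SPEC =====
-- self-contained effective cell value (definitionally equal to pvAeff, restated so the
-- precondition does not share definitions with the ports)
def pvVal (sol : List (List Int)) (yel : List (List Bool)) (r c : Nat) : Int :=
  if (yel.getD r []).getD c false then (sol.getD r []).getD c 0 * 2 else (sol.getD r []).getD c 0
def pvBadH (sol : List (List Int)) (yel : List (List Bool)) (r c : Nat) : Prop :=
  pvVal sol yel r c = pvVal sol yel r (c+1)
def pvBadV (sol : List (List Int)) (yel : List (List Bool)) (r c : Nat) : Prop :=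
  pvVal sol yel r c = pvVal sol yel (r+1) c

-- Pre_ is exactly the set of inputs on which Python A returns: A raises IndexError at the first
-- unreadable grid cell in its scan order, unless a readable adjacent equality strictly earlier in
-- that order makes it return (None, None, False) first; Pre_ states declaratively that every
-- unreadable scan step is preceded by such an equality.
def pvOkCell (sol : List (List Int)) (yel : List (List Bool)) (r c : Nat) : Prop :=
  r < sol.length ∧ c < (sol.getD r []).length ∧ r < yel.length ∧ c < (yel.getD r []).length

-- some adjacent equality between readable cells occurs before scan position n
-- (h-step (r, c) has position 5*r+c, v-step (r, c) has position 30+6*r+c)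
def pvEqBefore (sol : List (List Int)) (yel : List (List Bool)) (n : Nat) : Prop :=
  (∃ r < 6, ∃ c < 5, 5*r+c < n ∧ pvOkCell sol yel r c ∧ pvOkCell sol yel r (c+1) ∧ pvBadH sol yel r c) ∨
  (∃ r < 5, ∃ c < 6, 30+6*r+c < n ∧ pvOkCell sol yel r c ∧ pvOkCell sol yel (r+1) c ∧ pvBadV sol yel r c)

def Pre_compute_signs_py (solution : List (List Int)) (yellows : List (List Bool)) : Prop :=
  (∀ r < 6, ∀ c < 5, ¬(pvOkCell solution yellows r c ∧ pvOkCell solution yellows r (c+1)) →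
      pvEqBefore solution yellows (5*r+c)) ∧
  (∀ r < 5, ∀ c < 6, ¬(pvOkCell solution yellows r c ∧ pvOkCell solution yellows (r+1) c) →
      pvEqBefore solution yellows (30+6*r+c))
instance (solution : List (List Int)) (yellows : List (List Bool)) : Decidable (Pre_compute_signs_py solution yellows) := by
  haveI : ∀ r c : Nat, Decidable (pvBadH solution yellows r c) := fun r c => by unfold pvBadH; infer_instance
  haveI : ∀ r c : Nat, Decidable (pvBadV solution yellows r c) := fun r c => by unfold pvBadV; infer_instance
  haveI : ∀ r c : Nat, Decidable (pvOkCell solution yellows r c) := fun r c => by unfold pvOkCell; infer_instance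
  haveI : ∀ n : Nat, Decidable (pvEqBefore solution yellows n) := fun n => by unfold pvEqBefore; infer_instance
  unfold Pre_compute_signs_py
  infer_instance

def pvWitness_compute_signs_py : List (List Int) × List (List Bool) :=
  ([[1,2,3,4,5,6],[2,3,4,5,6,7],[3,4,5,6,7,8],[4,5,6,7,8,9],[5,6,7,8,9,10],[6,7,8,9,10,11]],
   [[false,false,false,false,false,false],[false,false,false,false,false,false],
    [false,false,false,false,false,false],[false,false,false,false,false,false],
    [false,false,false,false,false,false],[false,false,false,false,false,false]])

def Spec_compute_signs_py (solution : List (List Int)) (yellows : List (List Bool)) (out : Option (List (List (Option String))) × Option (List (List (Option String))) × Bool) : Prop := out = compute_signs_py_alt solution yellows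
instance (solution : List (List Int)) (yellows : List (List Bool)) (out : Option (List (List (Option String))) × Option (List (List (Option String))) × Bool) : Decidable (Spec_compute_signs_py solution yellows out) := by unfold Spec_compute_signs_py; infer_instance

-- ===== CLAIM =====
def Claim_equal_compute_signs_py : Prop := ∀ (solution : List (List Int)) (yellows : List (List Bool)), Dom_compute_signs_py solution yellows → Pre_compute_signs_py solution yellows → Spec_compute_signs_py solution yellows (compute_signs_py solution yellows)

-- ===== LEMMAS AND PROOFS =====

-- canonical answer both ports are proved equal to
def pvH (sol : List (List Int)) (yel : List (List Bool)) : List (List (Option String)) :=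
  (List.range 6).map fun r => (List.range 5).map fun c =>
    some (if pvAeff sol yel r c < pvAeff sol yel r (c+1) then "<" else ">")
def pvV (sol : List (List Int)) (yel : List (List Bool)) : List (List (Option String)) :=
  (List.range 5).map fun r => (List.range 6).map fun c =>
    some (if pvAeff sol yel (r+1) c < pvAeff sol yel r c then "v" else "^")

def pvCond (sol : List (List Int)) (yel : List (List Bool)) : Prop :=
  (∃ r < 6, ∃ c < 5, pvBadH sol yel r c) ∨ (∃ r < 5, ∃ c < 6, pvBadV sol yel r c)

theorem pv_foldl_bind_none {α σ : Type} (f : σ → α → Option σ) (L : List α) :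
    L.foldl (fun acc a => acc.bind fun s => f s a) none = none := by
  induction L with
  | nil => rfl
  | cons a L ih => simpa using ih

/-- Early-exit fold whose failure condition is state-independent:
    it fails iff some element fails, else equals the pure fold. -/
theorem pv_foldl_bind_char {α σ : Type} (L : List α) (f : σ → α → Option σ)
    (P : α → Prop) [DecidablePred P] (g : σ → α → σ)
    (hf : ∀ s a, f s a = if P a then none else some (g s a)) (init : σ) :
    L.foldl (fun acc a => acc.bind fun s => f s a) (some init) =
      if ∃ a ∈ L, P a then none else some (L.foldl g init) := by
  induction L generalizing init with
  | nil => simp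
  | cons a L ih =>
    rw [List.foldl_cons, List.foldl_cons]
    show (L.foldl (fun acc a => acc.bind fun s => f s a) (f init a)) = _
    rw [hf]
    by_cases h : P a
    · rw [if_pos h, pv_foldl_bind_none, if_pos ⟨a, List.mem_cons_self, h⟩]
    · rw [if_neg h, ih]
      by_cases h2 : ∃ x ∈ L, P x
      · rw [if_pos h2, if_pos]
        obtain ⟨x, hx, hp⟩ := h2; exact ⟨x, List.mem_cons_of_mem _ hx, hp⟩
      · rw [if_neg h2, if_neg]
        rintro ⟨x, hx, hp⟩
        rcases List.mem_cons.mp hx with rfl | hx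
        · exact h hp
        · exact h2 ⟨x, hx, hp⟩

theorem pv_fillH (e : Nat → Nat → Option String) :
    (List.range 6).foldl (fun h r => (List.range 5).foldl (fun h c => pvSet2 h r c (e r c)) h)
      (List.replicate 6 (List.replicate 5 none)) =
    (List.range 6).map (fun r => (List.range 5).map fun c => e r c) := by
  simp [List.range_succ, pvSet2, List.set, List.getD]

theorem pv_fillV (e : Nat → Nat → Option String) :
    (List.range 5).foldl (fun v r => (List.range 6).foldl (fun v c => pvSet2 v r c (e r c)) v)
      (List.replicate 5 (List.replicate 6 none)) =
    (List.range 5).map (fun r => (List.range 6).map fun c => e r c) := by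
  simp [List.range_succ, pvSet2, List.set, List.getD]

/-- Shared computation for A's characterization. -/
theorem pv_charA_folds (sol : List (List Int)) (yel : List (List Bool)) :
    ∀ (h1 : ¬ ∃ r < 6, ∃ c < 5, pvAeff sol yel r c = pvAeff sol yel r (c+1))
      (h2 : ¬ ∃ r < 5, ∃ c < 6, pvAeff sol yel r c = pvAeff sol yel (r+1) c),
      compute_signs_py sol yel = (some (pvH sol yel), some (pvV sol yel), true) := by
  intro h1 h2
  have hH := pv_foldl_bind_char (List.range 6)
    (fun h r => (List.range 5).foldl (fun acc2 c => acc2.bind fun h =>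
        let a := pvAeff sol yel r c
        let b := pvAeff sol yel r (c+1)
        if a = b then none
        else some (pvSet2 h r c (some (if a < b then "<" else ">")))) (some h))
    (fun r => ∃ c ∈ List.range 5, pvAeff sol yel r c = pvAeff sol yel r (c+1))
    (fun h r => (List.range 5).foldl (fun h c =>
        pvSet2 h r c (some (if pvAeff sol yel r c < pvAeff sol yel r (c+1) then "<" else ">"))) h)
    (fun s r => pv_foldl_bind_char (List.range 5) _
      (fun c => pvAeff sol yel r c = pvAeff sol yel r (c+1))
      (fun h c => pvSet2 h r c (some (if pvAeff sol yel r c < pvAeff sol yel r (c+1) then "<" else ">")))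
      (fun s c => rfl) s)
    (List.replicate 6 (List.replicate 5 none))
  have hV := pv_foldl_bind_char (List.range 5)
    (fun v r => (List.range 6).foldl (fun acc2 c => acc2.bind fun v =>
        let a := pvAeff sol yel r c
        let b := pvAeff sol yel (r+1) c
        if a = b then none
        else some (pvSet2 v r c (some (if b < a then "v" else "^")))) (some v))
    (fun r => ∃ c ∈ List.range 6, pvAeff sol yel r c = pvAeff sol yel (r+1) c)
    (fun v r => (List.range 6).foldl (fun v c =>
        pvSet2 v r c (some (if pvAeff sol yel (r+1) c < pvAeff sol yel r c then "v" else "^"))) v)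
    (fun s r => pv_foldl_bind_char (List.range 6) _
      (fun c => pvAeff sol yel r c = pvAeff sol yel (r+1) c)
      (fun v c => pvSet2 v r c (some (if pvAeff sol yel (r+1) c < pvAeff sol yel r c then "v" else "^")))
      (fun s c => rfl) s)
    (List.replicate 5 (List.replicate 6 none))
  simp only [pv_fillH, pv_fillV] at hH hV
  simp at hH hV
  simp [compute_signs_py, hH, hV, h1, h2, pvH, pvV]

/-- Shared computation for A's characterization, failing case. -/
theorem pv_charA_pos (sol : List (List Int)) (yel : List (List Bool))
    (hc : pvCond sol yel) : compute_signs_py sol yel = (none, none, false) := by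
  have hc' : (∃ r < 6, ∃ c < 5, pvAeff sol yel r c = pvAeff sol yel r (c+1)) ∨
      (∃ r < 5, ∃ c < 6, pvAeff sol yel r c = pvAeff sol yel (r+1) c) := hc
  have hH := pv_foldl_bind_char (List.range 6)
    (fun h r => (List.range 5).foldl (fun acc2 c => acc2.bind fun h =>
        let a := pvAeff sol yel r c
        let b := pvAeff sol yel r (c+1)
        if a = b then none
        else some (pvSet2 h r c (some (if a < b then "<" else ">")))) (some h))
    (fun r => ∃ c ∈ List.range 5, pvAeff sol yel r c = pvAeff sol yel r (c+1))
    (fun h r => (List.range 5).foldl (fun h c =>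
        pvSet2 h r c (some (if pvAeff sol yel r c < pvAeff sol yel r (c+1) then "<" else ">"))) h)
    (fun s r => pv_foldl_bind_char (List.range 5) _
      (fun c => pvAeff sol yel r c = pvAeff sol yel r (c+1))
      (fun h c => pvSet2 h r c (some (if pvAeff sol yel r c < pvAeff sol yel r (c+1) then "<" else ">")))
      (fun s c => rfl) s)
    (List.replicate 6 (List.replicate 5 none))
  have hV := pv_foldl_bind_char (List.range 5)
    (fun v r => (List.range 6).foldl (fun acc2 c => acc2.bind fun v =>
        let a := pvAeff sol yel r c
        let b := pvAeff sol yel (r+1) c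
        if a = b then none
        else some (pvSet2 v r c (some (if b < a then "v" else "^")))) (some v))
    (fun r => ∃ c ∈ List.range 6, pvAeff sol yel r c = pvAeff sol yel (r+1) c)
    (fun v r => (List.range 6).foldl (fun v c =>
        pvSet2 v r c (some (if pvAeff sol yel (r+1) c < pvAeff sol yel r c then "v" else "^"))) v)
    (fun s r => pv_foldl_bind_char (List.range 6) _
      (fun c => pvAeff sol yel r c = pvAeff sol yel (r+1) c)
      (fun v c => pvSet2 v r c (some (if pvAeff sol yel (r+1) c < pvAeff sol yel r c then "v" else "^")))
      (fun s c => rfl) s)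
    (List.replicate 5 (List.replicate 6 none))
  simp only [pv_fillH, pv_fillV] at hH hV
  simp at hH hV
  by_cases h1 : ∃ r < 6, ∃ c < 5, pvAeff sol yel r c = pvAeff sol yel r (c+1)
  · simp [compute_signs_py, hH, h1]
  · have h2 : ∃ r < 5, ∃ c < 6, pvAeff sol yel r c = pvAeff sol yel (r+1) c := hc.resolve_left h1
    simp [compute_signs_py, hH, hV, h1, h2]

-- ----- B side -----

theorem pv_slice_tail {α : Type} (xs : List α) :
    PySem.List.slice xs (some 1) none = xs.tail :=
  PySem.List.slice_from_one xs

theorem pv_beff_eq (sol : List (List Int)) (yel : List (List Bool)) (r c : Nat) :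
    pvBeff sol yel r c = pvAeff sol yel r c := rfl

theorem pv_condB_pos (sol : List (List Int)) (yel : List (List Bool)) (hc : pvCond sol yel) :
    (((List.range 6).flatMap fun r => (List.range 5).map fun c =>
        (pvBeff sol yel r c, pvBeff sol yel r (c+1))).any (fun ab => ab.1 == ab.2) ||
     ((List.range 5).flatMap fun r => (List.range 6).map fun c =>
        (pvBeff sol yel r c, pvBeff sol yel (r+1) c)).any (fun ab => ab.1 == ab.2)) = true := by
  rcases hc with ⟨r, hr, c, hcm, hb⟩ | ⟨r, hr, c, hcm, hb⟩
  · apply Bool.or_eq_true_iff.mpr; left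
    rw [List.any_eq_true]
    exact ⟨(pvBeff sol yel r c, pvBeff sol yel r (c+1)),
      List.mem_flatMap.mpr ⟨r, List.mem_range.mpr hr,
        List.mem_map.mpr ⟨c, List.mem_range.mpr hcm, rfl⟩⟩,
      beq_iff_eq.mpr hb⟩
  · apply Bool.or_eq_true_iff.mpr; right
    rw [List.any_eq_true]
    exact ⟨(pvBeff sol yel r c, pvBeff sol yel (r+1) c),
      List.mem_flatMap.mpr ⟨r, List.mem_range.mpr hr,
        List.mem_map.mpr ⟨c, List.mem_range.mpr hcm, rfl⟩⟩,
      beq_iff_eq.mpr hb⟩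

theorem pv_condB_neg (sol : List (List Int)) (yel : List (List Bool)) (hc : ¬ pvCond sol yel) :
    (((List.range 6).flatMap fun r => (List.range 5).map fun c =>
        (pvBeff sol yel r c, pvBeff sol yel r (c+1))).any (fun ab => ab.1 == ab.2) ||
     ((List.range 5).flatMap fun r => (List.range 6).map fun c =>
        (pvBeff sol yel r c, pvBeff sol yel (r+1) c)).any (fun ab => ab.1 == ab.2)) = false := by
  rw [Bool.or_eq_false_iff]
  constructor <;> rw [List.any_eq_false] <;> intro ab hab
  · obtain ⟨r, hr, hab2⟩ := List.mem_flatMap.mp hab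
    obtain ⟨c, hcm, rfl⟩ := List.mem_map.mp hab2
    intro heq
    exact hc (Or.inl ⟨r, List.mem_range.mp hr, c, List.mem_range.mp hcm, beq_iff_eq.mp heq⟩)
  · obtain ⟨r, hr, hab2⟩ := List.mem_flatMap.mp hab
    obtain ⟨c, hcm, rfl⟩ := List.mem_map.mp hab2
    intro heq
    exact hc (Or.inr ⟨r, List.mem_range.mp hr, c, List.mem_range.mp hcm, beq_iff_eq.mp heq⟩)

/-- B's characterization, failing case. -/
theorem pv_charB_pos (sol : List (List Int)) (yel : List (List Bool)) (hc : pvCond sol yel) :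
    compute_signs_py_alt sol yel = (none, none, false) := by
  unfold compute_signs_py_alt
  rw [if_pos (pv_condB_pos sol yel hc)]

/-- B's characterization, succeeding case. -/
theorem pv_charB_neg (sol : List (List Int)) (yel : List (List Bool)) (hc : ¬ pvCond sol yel) :
    compute_signs_py_alt sol yel = (some (pvH sol yel), some (pvV sol yel), true) := by
  have hB := pv_condB_neg sol yel hc
  unfold compute_signs_py_alt
  rw [if_neg (by rw [hB]; simp)]
  refine Prod.ext ?_ (Prod.ext ?_ rfl)
  · simp [pvH, pv_slice_tail, List.range_succ, pv_beff_eq]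
  · simp [pvV, pv_slice_tail, List.range_succ, pv_beff_eq]

-- ===== VERDICT =====
theorem compute_signs_py_spec : Claim_equal_compute_signs_py := by
  intro sol yel _ _
  show compute_signs_py sol yel = compute_signs_py_alt sol yel
  by_cases hc : pvCond sol yel
  · rw [pv_charA_pos sol yel hc, pv_charB_pos sol yel hc]
  · rw [pv_charA_folds sol yel (fun h => hc (Or.inl h)) (fun h => hc (Or.inr h)),
      pv_charB_neg sol yel hc]
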